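-- pv_equiv track=rewrite | github.com/eduardocerqueira/seeker | seeker/snippet/check_domain.py | find_whois_server
-- ===== SOURCE A (Python) =====
-- from typing import Optional
--
-- WHOIS_SERVERS: dict[str, str] = {
--     "com": "whois.verisign-grs.com",
--     "net": "whois.verisign-grs.com",
--     "org": "whois.publicinterestregistry.org",
--     "co": "whois.registry.co",
--     "io": "whois.nic.io",
--     "se": "whois.iis.se",
--     "de": "whois.denic.de",
--     "eu": "whois.eu",
--     "it": "whois.nic.it",
--     "ch": "whois.nic.ch",
--     "be": "whois.dns.be",
--     "nl": "whois.domain-registry.nl",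
--     "at": "whois.nic.at",
--     "es": "whois.nic.es",
--     "jp": "whois.jprs.jp",
--     "us": "whois.nic.us",
--     "me": "whois.nic.me",
--     "uk": "whois.nic.uk",
--     "co.uk": "whois.nic.uk",
--     "ru": "whois.tcinet.ru",
--     "br": "whois.registro.br",
--     "in": "whois.nixiregistry.in",
--     "nz": "whois.irs.net.nz",
--     "cc": "ccwhois.verisign-grs.com",
--     "tv": "whois.nic.tv",
--     "ai": "whois.nic.ai",
-- }
--
-- def find_whois_server(domain: str) -> Optional[str]:
--     """Find a WHOIS server for the domain's TLD."""
--     parts = domain.lower().strip(".").split(".")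
--     if len(parts) < 2:
--         return None
--
--     # Try multi-level TLD first (co.uk)
--     for i in range(len(parts) - 1):
--         candidate = ".".join(parts[i + 1:])
--         if candidate in WHOIS_SERVERS:
--             return WHOIS_SERVERS[candidate]
--
--     return None
-- ===== SOURCE B (Python) =====
-- from typing import Optional
--
-- WHOIS_SERVERS: dict[str, str] = {
--     "com": "whois.verisign-grs.com",
--     "net": "whois.verisign-grs.com",
--     "org": "whois.publicinterestregistry.org",
--     "co": "whois.registry.co",
--     "io": "whois.nic.io",
--     "se": "whois.iis.se",
--     "de": "whois.denic.de",
--     "eu": "whois.eu",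
--     "it": "whois.nic.it",
--     "ch": "whois.nic.ch",
--     "be": "whois.dns.be",
--     "nl": "whois.domain-registry.nl",
--     "at": "whois.nic.at",
--     "es": "whois.nic.es",
--     "jp": "whois.jprs.jp",
--     "us": "whois.nic.us",
--     "me": "whois.nic.me",
--     "uk": "whois.nic.uk",
--     "co.uk": "whois.nic.uk",
--     "ru": "whois.tcinet.ru",
--     "br": "whois.registro.br",
--     "in": "whois.nixiregistry.in",
--     "nz": "whois.irs.net.nz",
--     "cc": "ccwhois.verisign-grs.com",
--     "tv": "whois.nic.tv",
--     "ai": "whois.nic.ai",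
-- }
--
-- def find_whois_server(domain: str) -> Optional[str]:
--     """Find a WHOIS server for the domain's TLD (accumulated-suffix scan)."""
--     parts = domain.lower().strip(".").split(".")
--     if len(parts) < 2:
--         return None
--
--     # Build suffixes right-to-left; the last hit is the longest matching suffix.
--     suffix = parts[-1]
--     best = WHOIS_SERVERS.get(suffix)
--     for label in reversed(parts[1:-1]):
--         suffix = label + "." + suffix
--         server = WHOIS_SERVERS.get(suffix)
--         if server is not None:
--             best = server
--     return best
-- ===== Notes on version B (the rewrite author's own statement) =====
-- stated objective: alternative
-- what changed: Replaces A's longest-first rescan, which re-joins a fresh slice for every start index, by a single right-to-left pass that accumulates the suffix one label at a time and keeps the last (= longest) dictionary hit.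
import Mathlib
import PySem

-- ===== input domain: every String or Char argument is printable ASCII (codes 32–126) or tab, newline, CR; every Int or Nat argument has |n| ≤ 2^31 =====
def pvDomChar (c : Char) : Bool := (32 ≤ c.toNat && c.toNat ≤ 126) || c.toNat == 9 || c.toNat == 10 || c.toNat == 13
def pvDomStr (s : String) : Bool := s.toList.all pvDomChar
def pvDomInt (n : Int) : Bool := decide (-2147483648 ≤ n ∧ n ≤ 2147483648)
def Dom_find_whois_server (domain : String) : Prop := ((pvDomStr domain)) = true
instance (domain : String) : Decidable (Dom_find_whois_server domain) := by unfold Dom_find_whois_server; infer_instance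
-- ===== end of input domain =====

-- B replaces A's longest-first rescan (re-joining a slice per index) by one right-to-left pass
-- that accumulates the suffix label by label and keeps the last (= longest) hit: alternative decomposition.

def WHOIS_SERVERS : PySem.Dict String String := PySem.Dict.ofList [
  ("com", "whois.verisign-grs.com"),
  ("net", "whois.verisign-grs.com"),
  ("org", "whois.publicinterestregistry.org"),
  ("co", "whois.registry.co"),
  ("io", "whois.nic.io"),
  ("se", "whois.iis.se"),
  ("de", "whois.denic.de"),
  ("eu", "whois.eu"),
  ("it", "whois.nic.it"),
  ("ch", "whois.nic.ch"),
  ("be", "whois.dns.be"),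
  ("nl", "whois.domain-registry.nl"),
  ("at", "whois.nic.at"),
  ("es", "whois.nic.es"),
  ("jp", "whois.jprs.jp"),
  ("us", "whois.nic.us"),
  ("me", "whois.nic.me"),
  ("uk", "whois.nic.uk"),
  ("co.uk", "whois.nic.uk"),
  ("ru", "whois.tcinet.ru"),
  ("br", "whois.registro.br"),
  ("in", "whois.nixiregistry.in"),
  ("nz", "whois.irs.net.nz"),
  ("cc", "ccwhois.verisign-grs.com"),
  ("tv", "whois.nic.tv"),
  ("ai", "whois.nic.ai")]

-- ===== PORT A =====
-- domain.lower().strip(".").split("."): split? is some because the separator "." is nonempty.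
def find_whois_server (domain : String) : Option String :=
  let parts := (PySem.Str.split? (PySem.Str.stripChars (PySem.Str.lower domain) ".") ".").getD []
  if parts.length < 2 then none
  else
    (PySem.List.pyRange 0 ((parts.length : Int) - 1) 1).findSome? (fun i =>
      let candidate := PySem.Str.join "." (PySem.List.slice parts (some (i + 1)) none)
      if WHOIS_SERVERS.contains candidate then WHOIS_SERVERS.get? candidate
      else none)

-- ===== PORT B =====
-- loop body of Source B: extend the suffix by one label, overwrite best on a dict hit.
def whoisStep (st : String × Option String) (label : String) : String × Option String :=
  let suffix := label ++ "." ++ st.1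
  match WHOIS_SERVERS.get? suffix with
  | some server => (suffix, some server)
  | none => (suffix, st.2)

def find_whois_server_alt (domain : String) : Option String :=
  let parts := (PySem.Str.split? (PySem.Str.stripChars (PySem.Str.lower domain) ".") ".").getD []
  if parts.length < 2 then none
  else
    match PySem.List.pyGet? parts (-1) with
    | none => none  -- unreachable: parts has ≥ 2 elements here
    | some last =>
      ((PySem.List.slice parts (some 1) (some (-1))).reverse.foldl whoisStep
        (last, WHOIS_SERVERS.get? last)).2

-- ===== PRECONDITION & SPEC =====
def Spec_find_whois_server (domain : String) (out : Option String) : Prop := out = find_whois_server_alt domain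
instance (domain : String) (out : Option String) : Decidable (Spec_find_whois_server domain out) := by unfold Spec_find_whois_server; infer_instance

-- ===== CLAIM (what is proved, stated in full; the proofs are below) =====
def Claim_equal_find_whois_server : Prop := ∀ (domain : String), Dom_find_whois_server domain → Spec_find_whois_server domain (find_whois_server domain)

-- ===== LEMMAS AND PROOFS =====

-- "if c in d: return d[c]" is just the optional lookup.
theorem ifContains_get (c : String) :
    (if WHOIS_SERVERS.contains c then WHOIS_SERVERS.get? c else none) = WHOIS_SERVERS.get? c := by
  rw [PySem.Dict.contains_eq_isSome_get?]
  cases h : WHOIS_SERVERS.get? c <;> simp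

theorem join_singleton_str (s : String) : PySem.Str.join "." [s] = s := by
  apply String.toList_inj.mp
  rw [PySem.Str.toList_join]
  simp [PySem.Chars.join_singleton]

theorem join_cons_str (y : String) (ls : List String) (h : ls ≠ []) :
    PySem.Str.join "." (y :: ls) = y ++ "." ++ PySem.Str.join "." ls := by
  cases ls with
  | nil => exact absurd rfl h
  | cons q rest =>
    apply String.toList_inj.mp
    rw [PySem.Str.toList_join]
    simp [PySem.Chars.join_cons_cons, PySem.Str.toList_join]

-- the result of B's overwrite loop, written as the first dict hit among the suffixes, longest first
def bestOf (ls : List String) (s : String) (b : Option String) : Option String :=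
  match ls with
  | [] => b
  | y :: ls' =>
    match WHOIS_SERVERS.get? (PySem.Str.join "." (y :: (ls' ++ [s]))) with
    | some v => some v
    | none => bestOf ls' s b

theorem foldB_eq (ls : List String) (s : String) (b : Option String) :
    ls.reverse.foldl whoisStep (s, b) = (PySem.Str.join "." (ls ++ [s]), bestOf ls s b) := by
  induction ls with
  | nil => simp [bestOf, join_singleton_str]
  | cons y ls ih =>
    rw [List.reverse_cons, List.foldl_append, ih]
    show whoisStep _ y = _
    unfold whoisStep
    have hj : PySem.Str.join "." (y :: ls ++ [s]) = y ++ "." ++ PySem.Str.join "." (ls ++ [s]) :=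
      join_cons_str y (ls ++ [s]) (by simp)
    simp only [bestOf, List.cons_append, ← hj]
    cases h : WHOIS_SERVERS.get? (PySem.Str.join "." (y :: (ls ++ [s]))) <;> simp

theorem findSome_eq_bestOf (ls : List String) (s : String) :
    (List.range (ls.length + 1)).findSome?
        (fun k => WHOIS_SERVERS.get? (PySem.Str.join "." ((ls ++ [s]).drop k)))
      = bestOf ls s (WHOIS_SERVERS.get? s) := by
  induction ls with
  | nil =>
    simp only [List.length_nil, Nat.zero_add, List.range_one, List.findSome?_cons,
      List.findSome?_nil, List.drop_zero, List.nil_append, join_singleton_str, bestOf]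
    cases h : WHOIS_SERVERS.get? s <;> simp
  | cons y ls ih =>
    rw [List.length_cons, List.range_succ_eq_map, List.findSome?_cons, List.findSome?_map]
    simp only [List.drop_zero, Function.comp_def, List.drop_succ_cons, List.cons_append, ih]
    simp only [bestOf]
    cases WHOIS_SERVERS.get? (PySem.Str.join "." (y :: (ls ++ [s]))) <;> rfl

-- parts[1:-1] on a list with explicit first and last element
theorem slice_one_negone {α : Type} (x y : α) (xs : List α) :
    PySem.List.slice (x :: (xs ++ [y])) (some 1) (some (-1)) = xs := by
  simp [PySem.List.slice, PySem.List.clampIdx]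
  rw [if_neg (by omega : ¬((xs.length : Int) + 1 < 0))]
  simp

-- A's indexed loop over a decomposed parts list is the longest-first scan bestOf describes
theorem loopA_eq_bestOf (p0 last : String) (mid : List String) :
    (PySem.List.pyRange 0 (((p0 :: (mid ++ [last])).length : Int) - 1) 1).findSome? (fun i =>
        let candidate := PySem.Str.join "." (PySem.List.slice (p0 :: (mid ++ [last])) (some (i + 1)) none)
        if WHOIS_SERVERS.contains candidate then WHOIS_SERVERS.get? candidate else none)
      = bestOf mid last (WHOIS_SERVERS.get? last) := by
  have h1 : (((p0 :: (mid ++ [last])).length : Int) - 1) = ((mid.length + 1 : Nat) : Int) := by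
    simp
  rw [h1, show (0 : Int) = ((0 : Nat) : Int) from rfl, PySem.List.pyRange_one, List.findSome?_map]
  have h2 : (((mid.length + 1 : Nat) : Int) - ((0 : Nat) : Int)).toNat = mid.length + 1 := by omega
  rw [h2, ← findSome_eq_bestOf]
  congr 1
  funext k
  have h3 : ((0 : Nat) : Int) + (k : Int) + 1 = ((k + 1 : Nat) : Int) := by push_cast; ring
  simp only [Function.comp_def, h3, PySem.List.slice_from_natCast, List.drop_succ_cons,
    ifContains_get]

-- the two loop bodies agree for every parts list (the common preprocessing is abstracted away)
theorem core_eq (parts : List String) :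
    (if parts.length < 2 then none
     else (PySem.List.pyRange 0 ((parts.length : Int) - 1) 1).findSome? (fun i =>
        let candidate := PySem.Str.join "." (PySem.List.slice parts (some (i + 1)) none)
        if WHOIS_SERVERS.contains candidate then WHOIS_SERVERS.get? candidate else none))
    = (if parts.length < 2 then none
       else match PySem.List.pyGet? parts (-1) with
            | none => none
            | some last =>
              ((PySem.List.slice parts (some 1) (some (-1))).reverse.foldl whoisStep
                (last, WHOIS_SERVERS.get? last)).2) := by
  by_cases hlen : parts.length < 2
  · simp [hlen]
  · rw [if_neg hlen, if_neg hlen]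
    obtain ⟨p0, t, rfl⟩ : ∃ p0 t, parts = p0 :: t := by
      cases parts with
      | nil => simp at hlen
      | cons a t => exact ⟨a, t, rfl⟩
    have ht : t ≠ [] := by
      intro h; subst h; simp at hlen
    obtain ⟨mid, last, rfl⟩ : ∃ mid last, t = mid ++ [last] :=
      ⟨t.dropLast, t.getLast ht, (List.dropLast_append_getLast ht).symm⟩
    have hget : PySem.List.pyGet? (p0 :: (mid ++ [last])) (-1) = some last := by
      rw [show p0 :: (mid ++ [last]) = (p0 :: mid) ++ [last] by simp]
      exact PySem.List.pyGet?_neg_one_append_singleton _ _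
    simp only [hget, slice_one_negone]
    rw [foldB_eq, loopA_eq_bestOf]

-- ===== VERDICT (by name: the statement is the Claim_ definition above) =====
theorem find_whois_server_spec : Claim_equal_find_whois_server := by
  intro domain _
  unfold Spec_find_whois_server find_whois_server find_whois_server_alt
  exact core_eq ((PySem.Str.split? (PySem.Str.stripChars (PySem.Str.lower domain) ".") ".").getD [])
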